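-- pv_equiv track=rewrite | github.com/scabench-org/scabench | baseline-generator/compare_results.py | severities_match
-- ===== SOURCE A (Python) =====
-- def severities_match(baseline_sev: str, expected_sev: str) -> bool:
--     """Check if severities are compatible"""
--     baseline_sev = baseline_sev.lower()
--     expected_sev = expected_sev.lower()
--
--     # Direct match
--     if baseline_sev == expected_sev:
--         return True
--
--     # Allow some flexibility (e.g., high/critical, low/informational)
--     severity_groups = [
--         {'critical', 'high'},
--         {'medium'},
--         {'low', 'informational', 'info'}
--     ]
--
--     for group in severity_groups:
--         if baseline_sev in group and expected_sev in group:
--             return True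
--
--     return False
-- ===== SOURCE B (Python) =====
-- _CANON = {'critical': 'high', 'informational': 'low', 'info': 'low'}
--
-- def _canon(s: str) -> str:
--     s = s.lower()
--     return _CANON.get(s, s)
--
-- def severities_match(baseline_sev: str, expected_sev: str) -> bool:
--     """Check if severities are compatible"""
--     return _canon(baseline_sev) == _canon(expected_sev)
-- ===== Notes on version B (the rewrite author's own statement) =====
-- stated objective: simpler
-- what changed: Replaces the equality-check-then-scan-over-group-sets with a canonical-form algorithm: each label is normalized to one canonical representative of its group (unknown labels map to themselves) and the result is a single equality test, with no direct-equality branch and no membership scan.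
import Mathlib
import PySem

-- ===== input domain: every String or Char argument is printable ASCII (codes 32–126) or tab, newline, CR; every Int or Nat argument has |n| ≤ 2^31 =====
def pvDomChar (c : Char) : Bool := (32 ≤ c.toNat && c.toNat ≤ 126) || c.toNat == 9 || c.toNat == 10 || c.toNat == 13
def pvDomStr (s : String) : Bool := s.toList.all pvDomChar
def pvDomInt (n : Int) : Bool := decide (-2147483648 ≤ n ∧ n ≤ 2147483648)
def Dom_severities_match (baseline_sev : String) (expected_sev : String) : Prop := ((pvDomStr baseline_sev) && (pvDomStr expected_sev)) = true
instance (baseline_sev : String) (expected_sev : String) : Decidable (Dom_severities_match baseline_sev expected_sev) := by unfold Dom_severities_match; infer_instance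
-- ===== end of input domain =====

-- B replaces A's equality-then-scan-over-group-sets with a canonical-form normalization and a single equality test (simpler).

-- ===== PORT A =====
def sev_severity_groups : List (PySem.Set String) :=
  [PySem.Set.ofList ["critical", "high"],
   PySem.Set.ofList ["medium"],
   PySem.Set.ofList ["low", "informational", "info"]]

def sevLoopA (b e : String) : List (PySem.Set String) → Bool
  | [] => false
  | g :: rest => if PySem.Set.contains g b && PySem.Set.contains g e then true else sevLoopA b e rest

def severities_match (baseline_sev : String) (expected_sev : String) : Bool :=
  let b := PySem.Str.lower baseline_sev
  let e := PySem.Str.lower expected_sev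
  if b == e then true
  else sevLoopA b e sev_severity_groups

-- ===== PORT B =====
def sevCanonTable : PySem.Dict String String :=
  PySem.Dict.ofList [("critical", "high"), ("informational", "low"), ("info", "low")]

def sevCanon (s : String) : String :=
  let t := PySem.Str.lower s
  sevCanonTable.getD t t

def severities_match_alt (baseline_sev : String) (expected_sev : String) : Bool :=
  sevCanon baseline_sev == sevCanon expected_sev

-- ===== PRECONDITION & SPEC =====
def Spec_severities_match (baseline_sev : String) (expected_sev : String) (out : Bool) : Prop := out = severities_match_alt baseline_sev expected_sev
instance (baseline_sev : String) (expected_sev : String) (out : Bool) : Decidable (Spec_severities_match baseline_sev expected_sev out) := by unfold Spec_severities_match; infer_instance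

-- ===== CLAIM (what is proved, stated in full; the proofs are below) =====
def Claim_equal_severities_match : Prop := ∀ (baseline_sev : String) (expected_sev : String), Dom_severities_match baseline_sev expected_sev → Spec_severities_match baseline_sev expected_sev (severities_match baseline_sev expected_sev)

-- ===== LEMMAS AND PROOFS =====

-- group id of a lowered label, proof-side characterization of A's group sets
def sevGidFun (s : String) : Option Int :=
  if s = "info" then some 2 else if s = "informational" then some 2
  else if s = "low" then some 2 else if s = "medium" then some 1
  else if s = "high" then some 0 else if s = "critical" then some 0 else none

-- proof-side characterization of B's canonical form (on a lowered label)
def sevCanonFun (s : String) : String :=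
  if s = "critical" then "high" else if s = "informational" then "low"
  else if s = "info" then "low" else s

theorem sev_canon_eq (s : String) :
    sevCanonTable.getD s s = sevCanonFun s := by
  simp [sevCanonTable, sevCanonFun, PySem.Dict.ofList, PySem.Dict.update, List.foldl,
    PySem.Dict.getD, PySem.Dict.get?_insert, PySem.Dict.get?_empty]
  split_ifs <;> simp_all

theorem sev_cont1 (s : String) :
    PySem.Set.contains (PySem.Set.ofList ["critical", "high"]) s = (sevGidFun s == some 0) := by
  unfold sevGidFun
  simp only [PySem.Set.contains, PySem.Set.ofList]
  split_ifs <;> simp_all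

theorem sev_cont2 (s : String) :
    PySem.Set.contains (PySem.Set.ofList ["medium"]) s = (sevGidFun s == some 1) := by
  unfold sevGidFun
  simp only [PySem.Set.contains, PySem.Set.ofList]
  split_ifs <;> simp_all

theorem sev_cont3 (s : String) :
    PySem.Set.contains (PySem.Set.ofList ["low", "informational", "info"]) s = (sevGidFun s == some 2) := by
  unfold sevGidFun
  simp only [PySem.Set.contains, PySem.Set.ofList]
  split_ifs <;> simp_all

theorem sev_gid_cases (s : String) :
    sevGidFun s = none ∨ sevGidFun s = some 0 ∨ sevGidFun s = some 1 ∨ sevGidFun s = some 2 := by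
  unfold sevGidFun; split_ifs <;> simp

theorem sev_canon_of_gid0 (s : String) (h : sevGidFun s = some 0) : sevCanonFun s = "high" := by
  unfold sevGidFun at h; unfold sevCanonFun; split_ifs at h ⊢ <;> simp_all

theorem sev_canon_of_gid1 (s : String) (h : sevGidFun s = some 1) : sevCanonFun s = "medium" := by
  unfold sevGidFun at h; unfold sevCanonFun; split_ifs at h ⊢ <;> simp_all

theorem sev_canon_of_gid2 (s : String) (h : sevGidFun s = some 2) : sevCanonFun s = "low" := by
  unfold sevGidFun at h; unfold sevCanonFun; split_ifs at h ⊢ <;> simp_all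

theorem sev_canon_of_unknown (s : String) (h : sevGidFun s = none) :
    sevCanonFun s = s ∧ s ≠ "high" ∧ s ≠ "medium" ∧ s ≠ "low" := by
  unfold sevGidFun at h; unfold sevCanonFun; split_ifs at h ⊢ <;> simp_all

theorem sev_core (x y : String) :
    (if x == y then true else sevLoopA x y sev_severity_groups)
      = (sevCanonFun x == sevCanonFun y) := by
  by_cases hxy : x = y
  · subst hxy; simp
  · simp only [beq_iff_eq, hxy, if_false]
    simp only [sev_severity_groups, sevLoopA, sev_cont1, sev_cont2, sev_cont3]
    rcases sev_gid_cases x with hx | hx | hx | hx <;>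
      rcases sev_gid_cases y with hy | hy | hy | hy <;>
      simp only [hx, hy]
    all_goals
      first
      | have cx := sev_canon_of_gid0 x hx
      | have cx := sev_canon_of_gid1 x hx
      | have cx := sev_canon_of_gid2 x hx
      | have cx := sev_canon_of_unknown x hx
    all_goals
      first
      | have cy := sev_canon_of_gid0 y hy
      | have cy := sev_canon_of_gid1 y hy
      | have cy := sev_canon_of_gid2 y hy
      | have cy := sev_canon_of_unknown y hy
    all_goals (try obtain ⟨cx0, cxh, cxm, cxl⟩ := cx)
    all_goals (try obtain ⟨cy0, cyh, cym, cyl⟩ := cy)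
    all_goals (try have cxh' := Ne.symm cxh)
    all_goals (try have cxm' := Ne.symm cxm)
    all_goals (try have cxl' := Ne.symm cxl)
    all_goals (try have cyh' := Ne.symm cyh)
    all_goals (try have cym' := Ne.symm cym)
    all_goals (try have cyl' := Ne.symm cyl)
    all_goals simp_all

-- ===== VERDICT (by name: the statement is the Claim_ definition above) =====
theorem severities_match_spec : Claim_equal_severities_match := by
  intro b e _
  unfold Spec_severities_match severities_match severities_match_alt sevCanon
  simp only [sev_canon_eq]
  exact sev_core (PySem.Str.lower b) (PySem.Str.lower e)
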